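-- pv_equiv track=rewrite | github.com/joshanashakya/dissertation | workspace/dataset/java-python/GeeksForGeeks/3796/A/2.py | minimumSubarrays
-- ===== SOURCE A (Python) =====
-- def minimumSubarrays(ar, n) :
--     se = []
--
--     cnt = 1;
--
--     for i in range(n) :
--
--         # Checking if an element already exist in
--         # the current sub-array
--         if se.count(ar[i]) == 0 :
--
--             # inserting the current element
--             se.append(ar[i])
--         else :
--             cnt += 1
--
--             # clear set for new possible value
--             # of subarrays
--             se.clear()
--
--             # inserting the current element
--             se.append(ar[i])
--     return cnt
-- ===== SOURCE B (Python) =====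
-- def minimumSubarrays(ar, n):
--     # Right-to-left pass: rev collects (back to front) reach[i] = end (exclusive)
--     # of the longest duplicate-free run starting at i; then count pointer jumps.
--     nxt = {}
--     rev = [n]
--     for i in range(n - 1, -1, -1):
--         rev.append(min(nxt.get(ar[i], n), rev[-1]))
--         nxt[ar[i]] = i
--     reach = rev[::-1]
--     cnt = 1
--     i = 0
--     while reach[i] < n:
--         cnt += 1
--         i = reach[i]
--     return cnt
-- ===== Notes on version B (the rewrite author's own statement) =====
-- stated objective: faster
-- what changed: Replaces A's single greedy pass with a rescanned-and-cleared membership list by a two-phase algorithm: a right-to-left pass builds a reach array (end of the longest duplicate-free run starting at each index, as suffix minima of next-occurrence indices) and a pointer-jumping loop over reach then counts the segments.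
import Mathlib
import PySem

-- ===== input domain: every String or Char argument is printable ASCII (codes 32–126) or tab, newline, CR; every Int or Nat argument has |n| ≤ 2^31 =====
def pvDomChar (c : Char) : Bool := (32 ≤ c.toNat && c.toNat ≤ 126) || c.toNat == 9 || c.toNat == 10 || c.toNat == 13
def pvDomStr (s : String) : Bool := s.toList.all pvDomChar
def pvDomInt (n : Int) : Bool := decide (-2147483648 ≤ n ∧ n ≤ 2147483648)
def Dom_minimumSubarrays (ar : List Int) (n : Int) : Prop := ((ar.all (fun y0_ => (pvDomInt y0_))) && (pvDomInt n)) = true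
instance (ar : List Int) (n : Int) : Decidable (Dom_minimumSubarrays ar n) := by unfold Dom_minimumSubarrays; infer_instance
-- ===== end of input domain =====

-- B replaces A's single greedy pass (membership list cleared at each cut) by a two-phase
-- algorithm: a right-to-left pass builds a reach array of longest duplicate-free run ends
-- via next-occurrence suffix minima, then a pointer-jumping loop counts the segments
-- (O(n) overall, measured faster than A's repeated list rescans on large inputs).


-- ===== PORT A =====
def minimumSubarrays (ar : List Int) (n : Int) : Int :=
  ((PySem.List.pyRange 0 n 1).foldl
    (fun (s : List Int × Int) i =>
      let x := PySem.List.pyGetD ar i 0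
      if PySem.List.count s.1 x == 0 then (s.1 ++ [x], s.2)
      else ([x], s.2 + 1))
    ([], 1)).2

-- ===== PORT B =====
-- B-side helper: the final `while reach[i] < n` pointer-jumping loop of Source B.
-- The Nat fuel is only a totality guard (the loop body is the literal Python body);
-- the equivalence proof shows n.toNat + 1 iterations are never exhausted.
def jumpLoopB (reach : List Int) (n : Int) : Nat → Int → Int → Int
  | 0, _, cnt => cnt
  | fuel + 1, i, cnt =>
    if PySem.List.pyGetD reach i 0 < n then
      jumpLoopB reach n fuel (PySem.List.pyGetD reach i 0) (cnt + 1)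
    else cnt

def minimumSubarrays_alt (ar : List Int) (n : Int) : Int :=
  let s := (PySem.List.pyRange (n - 1) (-1) (-1)).foldl
    (fun (s : PySem.Dict Int Int × List Int) i =>
      let x := PySem.List.pyGetD ar i 0
      (s.1.insert x i, s.2 ++ [min (s.1.getD x n) (PySem.List.pyGetD s.2 (-1) 0)]))
    (PySem.Dict.empty, [n])
  let reach := (PySem.List.slice? s.2 none none (-1)).getD []
  jumpLoopB reach n (n.toNat + 1) 0 1

-- ===== PRECONDITION & SPEC =====
-- Pre_ excludes exactly the inputs where Python A raises IndexError: n larger than len(ar).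
def Pre_minimumSubarrays (ar : List Int) (n : Int) : Prop := n ≤ (ar.length : Int)
instance (ar : List Int) (n : Int) : Decidable (Pre_minimumSubarrays ar n) := by
  unfold Pre_minimumSubarrays; infer_instance
def pvWitness_minimumSubarrays : List Int × Int := ([1, 2, 1, 3], 4)

def Spec_minimumSubarrays (ar : List Int) (n : Int) (out : Int) : Prop := out = minimumSubarrays_alt ar n
instance (ar : List Int) (n : Int) (out : Int) : Decidable (Spec_minimumSubarrays ar n out) := by unfold Spec_minimumSubarrays; infer_instance

-- ===== CLAIM (what is proved, stated in full; the proofs are below) =====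
def Claim_equal_minimumSubarrays : Prop := ∀ (ar : List Int) (n : Int), Dom_minimumSubarrays ar n → Pre_minimumSubarrays ar n → Spec_minimumSubarrays ar n (minimumSubarrays ar n)

-- ===== LEMMAS AND PROOFS =====

-- Structural (Nat-indexed) version of A's loop.
def loopA (ar : List Int) : Nat → List Int × Int
  | 0 => ([], 1)
  | m + 1 =>
    let s := loopA ar m
    let x := ar.getD m 0
    if PySem.List.count s.1 x == 0 then (s.1 ++ [x], s.2) else ([x], s.2 + 1)

lemma foldA_eq (ar : List Int) (m : Nat) :
    ((PySem.List.pyRange 0 (m : Int) 1).foldl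
      (fun (s : List Int × Int) i =>
        let x := PySem.List.pyGetD ar i 0
        if PySem.List.count s.1 x == 0 then (s.1 ++ [x], s.2)
        else ([x], s.2 + 1))
      ([], 1)) = loopA ar m := by
  induction m with
  | zero => rfl
  | succ m ih =>
    have hc : ((m + 1 : Nat) : Int) = (m : Int) + 1 := by push_cast; ring
    rw [hc, PySem.List.pyRange_one_succ_right (by positivity), List.foldl_append, ih]
    simp [loopA]

-- first index j with lo ≤ j < N and ar[j] = v, else N
def scanN (ar : List Int) (v : Int) (N : Nat) (j : Nat) : Nat :=
  if j < N then (if ar.getD j 0 = v then j else scanN ar v N (j + 1)) else N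
termination_by N - j

-- reach function: F t = end (exclusive) of the longest duplicate-free run starting at t
def F (ar : List Int) (N : Nat) (t : Nat) : Nat :=
  if t < N then min (scanN ar (ar.getD t 0) N (t + 1)) (F ar N (t + 1)) else N
termination_by N - t

-- jump chain: posFrom i j = position after j jumps starting at i
def posFrom (ar : List Int) (N : Nat) (i : Nat) : Nat → Nat
  | 0 => i
  | j + 1 => F ar N (posFrom ar N i j)

lemma scanN_spec (ar : List Int) (v : Int) (N : Nat) :
    ∀ (k j : Nat), N - j ≤ k → j ≤ N →
      j ≤ scanN ar v N j ∧ scanN ar v N j ≤ N ∧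
      (scanN ar v N j < N → ar.getD (scanN ar v N j) 0 = v) ∧
      (∀ m, j ≤ m → m < scanN ar v N j → ar.getD m 0 ≠ v) := by
  intro k
  induction k with
  | zero =>
    intro j hk hj
    have hjN : j = N := by omega
    rw [scanN]
    simp [hjN]
    exact fun m h1 h2 => absurd h2 (by omega)
  | succ k ih =>
    intro j hk hj
    by_cases hjN : j < N
    · rw [scanN, if_pos hjN]
      by_cases hv : ar.getD j 0 = v
      · rw [if_pos hv]
        exact ⟨le_refl j, by omega, fun _ => hv, fun m h1 h2 => by omega⟩
      · rw [if_neg hv]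
        obtain ⟨h1, h2, h3, h4⟩ := ih (j + 1) (by omega) (by omega)
        refine ⟨by omega, h2, h3, fun m hm1 hm2 => ?_⟩
        by_cases hmj : m = j
        · subst hmj; exact hv
        · exact h4 m (by omega) hm2
    · rw [scanN, if_neg hjN]
      exact ⟨by omega, le_refl N, by omega, fun m h1 h2 => by omega⟩

lemma F_spec (ar : List Int) (N : Nat) :
    ∀ (k t : Nat), N - t ≤ k → t ≤ N →
      t ≤ F ar N t ∧ F ar N t ≤ N ∧
      (t < N → t < F ar N t) ∧
      (F ar N t < N → ∃ m, t ≤ m ∧ m < F ar N t ∧ ar.getD m 0 = ar.getD (F ar N t) 0) ∧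
      (∀ j, t ≤ j → j < F ar N t → ∀ m, t ≤ m → m < j → ar.getD m 0 ≠ ar.getD j 0) := by
  intro k
  induction k with
  | zero =>
    intro t hk ht
    have htN : t = N := by omega
    rw [F]
    simp [htN]
    exact fun j hj1 hj2 => absurd hj2 (by omega)
  | succ k ih =>
    intro t hk ht
    by_cases htN : t < N
    · obtain ⟨s1, s2, s3, s4⟩ := scanN_spec ar (ar.getD t 0) N (N - (t + 1)) (t + 1) (by omega) (by omega)
      obtain ⟨i1, i2, i3, i4, i5⟩ := ih (t + 1) (by omega) (by omega)
      set nx := scanN ar (ar.getD t 0) N (t + 1) with hnx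
      have hF : F ar N t = min nx (F ar N (t + 1)) := by rw [F, if_pos htN]
      refine ⟨by omega, by omega, fun _ => by omega, ?_, ?_⟩
      · intro hlt
        rcases le_total nx (F ar N (t + 1)) with hc | hc
        · have : F ar N t = nx := by omega
          refine ⟨t, le_refl t, by omega, ?_⟩
          rw [this]
          exact (s3 (by omega)).symm
        · have hFe : F ar N t = F ar N (t + 1) := by omega
          obtain ⟨m, hm1, hm2, hm3⟩ := i4 (by omega)
          exact ⟨m, by omega, by rw [hFe]; omega, by rw [hFe]; exact hm3⟩
      · intro j hj1 hj2 m hm1 hm2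
        by_cases hmt : m = t
        · subst hmt
          have : j < nx := by omega
          intro heq
          exact s4 j (by omega) this heq.symm
        · exact i5 j (by omega) (by omega) m (by omega) hm2
    · rw [F, if_neg htN]
      refine ⟨by omega, by omega, by omega, by omega, ?_⟩
      intro j hj1 hj2
      omega

lemma F_of_ge (ar : List Int) (N t : Nat) (h : ¬ t < N) : F ar N t = N := by
  rw [F, if_neg h]

lemma lt_F (ar : List Int) (N t : Nat) (ht : t < N) : t < F ar N t :=
  (F_spec ar N (N - t) t (by omega) (by omega)).2.2.1 ht

lemma le_F (ar : List Int) (N t : Nat) (ht : t ≤ N) : t ≤ F ar N t :=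
  (F_spec ar N (N - t) t (by omega) ht).1

-- membership in the current segment (ar.take m).drop st
lemma mem_seg_iff (ar : List Int) (st m : Nat) (_hst : st ≤ m) (_hm : m ≤ ar.length) (x : Int) :
    x ∈ (ar.take m).drop st ↔ ∃ j, st ≤ j ∧ j < m ∧ ar.getD j 0 = x := by
  constructor
  · intro hx
    obtain ⟨t, ht, hxt⟩ := List.mem_iff_getElem.mp hx
    have hlen : ((ar.take m).drop st).length = m - st := by
      simp [List.length_drop, List.length_take]; omega
    refine ⟨st + t, by omega, by omega, ?_⟩
    have h1 : st + t < ar.length := by omega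
    rw [List.getD_eq_getElem ar 0 h1]
    rw [List.getElem_drop, List.getElem_take] at hxt
    exact hxt
  · rintro ⟨j, h1, h2, h3⟩
    apply List.mem_iff_getElem.mpr
    have hlen : ((ar.take m).drop st).length = m - st := by
      simp [List.length_drop, List.length_take]; omega
    refine ⟨j - st, by omega, ?_⟩
    rw [List.getElem_drop, List.getElem_take]
    have hj : j < ar.length := by omega
    have hsj : st + (j - st) = j := by omega
    simp only [hsj]
    rw [List.getD_eq_getElem ar 0 hj] at h3
    exact h3

lemma take_succ_getD (ar : List Int) (m : Nat) (hm : m < ar.length) :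
    ar.take (m + 1) = ar.take m ++ [ar.getD m 0] := by
  rw [List.take_add_one]
  simp [List.getElem?_eq_getElem hm]

lemma loopA_succ (ar : List Int) (m : Nat) :
    loopA ar (m + 1) =
      (if PySem.List.count (loopA ar m).1 (ar.getD m 0) == 0
       then ((loopA ar m).1 ++ [ar.getD m 0], (loopA ar m).2)
       else ([ar.getD m 0], (loopA ar m).2 + 1)) := rfl

-- The invariant of A's loop, phrased via the jump chain of F.
lemma invA (ar : List Int) (N : Nat) (hN : N ≤ ar.length) :
    ∀ m, m ≤ N → ∃ k,
      loopA ar m = ((ar.take m).drop (posFrom ar N 0 k), (k : Int) + 1) ∧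
      posFrom ar N 0 k ≤ m ∧ m ≤ F ar N (posFrom ar N 0 k) ∧
      ∀ j, j < k → F ar N (posFrom ar N 0 j) < N := by
  intro m
  induction m with
  | zero =>
    intro _
    exact ⟨0, by simp [loopA, posFrom], by simp [posFrom],
      by simp only [posFrom]; exact le_F ar N 0 (by omega), by omega⟩
  | succ m ih =>
    intro hm
    obtain ⟨k, hA, hle, hFle, hchain⟩ := ih (by omega)
    set st := posFrom ar N 0 k with hst
    clear_value st
    have hmN : m < N := by omega
    have hmlen : m < ar.length := by omega
    set x := ar.getD m 0 with hx
    have hmem : x ∈ (loopA ar m).1 ↔ ∃ j, st ≤ j ∧ j < m ∧ ar.getD j 0 = x := by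
      rw [hA]; exact mem_seg_iff ar st m hle (by omega) x
    have hcountA : (PySem.List.count (loopA ar m).1 x == 0) = true ↔ x ∉ (loopA ar m).1 := by
      rw [PySem.List.count_eq]
      constructor
      · intro h; exact List.count_eq_zero.mp (by simpa using h)
      · intro h; simpa using List.count_eq_zero.mpr h
    by_cases hdup : ∃ j, st ≤ j ∧ j < m ∧ ar.getD j 0 = x
    · -- cut step: m is exactly F st
      have hstle : st ≤ N := by omega
      have hFstm : F ar N st ≤ m := by
        by_contra hlt
        rw [not_le] at hlt
        obtain ⟨j, hj1, hj2, hj3⟩ := hdup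
        exact (F_spec ar N (N - st) st (by omega) hstle).2.2.2.2 m hle hlt j hj1 hj2 hj3
      have hmFst : m = F ar N st := by omega
      have hin : x ∈ (loopA ar m).1 := hmem.mpr hdup
      have hAcond : (PySem.List.count (loopA ar m).1 x == 0) = false := by
        cases hc : (PySem.List.count (loopA ar m).1 x == 0) with
        | false => rfl
        | true => exact (hcountA.mp hc hin).elim
      have hAstep : loopA ar (m + 1) = ([x], (loopA ar m).2 + 1) := by
        rw [loopA_succ, ← hx, hAcond]
        simp
      refine ⟨k + 1, ?_, ?_, ?_, ?_⟩
      · have hpos : posFrom ar N 0 (k + 1) = m := by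
          rw [show posFrom ar N 0 (k + 1) = F ar N (posFrom ar N 0 k) from rfl, ← hst]
          omega
        rw [hAstep, hA, hpos, take_succ_getD ar m hmlen, ← hx]
        have hlen : (ar.take m).length = m := by simp [List.length_take]; omega
        rw [show ((ar.take m ++ [x]).drop m) = (ar.take m ++ [x]).drop (ar.take m).length from by rw [hlen]]
        simp only [List.drop_left, Prod.mk.injEq]
        exact ⟨by trivial, by push_cast; ring⟩
      · show posFrom ar N 0 (k + 1) ≤ m + 1
        have : posFrom ar N 0 (k + 1) = F ar N st := by
          rw [show posFrom ar N 0 (k + 1) = F ar N (posFrom ar N 0 k) from rfl, ← hst]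
        omega
      · show m + 1 ≤ F ar N (posFrom ar N 0 (k + 1))
        have h1 : posFrom ar N 0 (k + 1) = m := by
          rw [show posFrom ar N 0 (k + 1) = F ar N (posFrom ar N 0 k) from rfl, ← hst]
          omega
        rw [h1]
        exact lt_F ar N m hmN
      · intro j hj
        by_cases hjk : j = k
        · subst hjk
          rw [← hst]
          omega
        · exact hchain j (by omega)
    · -- no-cut step: the segment grows, m + 1 ≤ F st
      have hstle : st ≤ N := by omega
      have hmlt : m < F ar N st := by
        rcases lt_or_ge m (F ar N st) with h | h
        · exact h
        · have hmFst : F ar N st = m := by omega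
          have hFlt : F ar N st < N := by omega
          obtain ⟨j, hj1, hj2, hj3⟩ := (F_spec ar N (N - st) st (by omega) hstle).2.2.2.1 hFlt
          have hj2' : j < m := by omega
          have hj3' : ar.getD j 0 = x := by rw [hx, ← hmFst]; exact hj3
          exact absurd ⟨j, hj1, hj2', hj3'⟩ hdup
      have hnin : x ∉ (loopA ar m).1 := fun h => hdup (hmem.mp h)
      have hAstep : loopA ar (m + 1) = ((loopA ar m).1 ++ [x], (loopA ar m).2) := by
        rw [loopA_succ, ← hx, hcountA.mpr hnin]
        simp
      refine ⟨k, ?_, by rw [← hst]; omega, by rw [← hst]; omega, hchain⟩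
      rw [hAstep, hA, take_succ_getD ar m hmlen, ← hx, ← hst]
      show (List.drop st (List.take m ar) ++ [x], (k : Int) + 1)
          = (List.drop st (List.take m ar ++ [x]), (k : Int) + 1)
      have hlen : st ≤ (ar.take m).length := by simp [List.length_take]; omega
      rw [List.drop_append_of_le_length hlen]

-- ===== B side =====

-- Structural (count-indexed) version of B's right-to-left fold: loopR j is the state
-- after processing indices n-1, n-2, …, n-j.
def loopR (ar : List Int) (n : Int) : Nat → PySem.Dict Int Int × List Int
  | 0 => (PySem.Dict.empty, [n])
  | j + 1 =>
    let s := loopR ar n j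
    let i : Int := (n - 1) - j
    let x := PySem.List.pyGetD ar i 0
    (s.1.insert x i, s.2 ++ [min (s.1.getD x n) (PySem.List.pyGetD s.2 (-1) 0)])

lemma foldB_eq (ar : List Int) (n : Int) :
    ((PySem.List.pyRange (n - 1) (-1) (-1)).foldl
      (fun (s : PySem.Dict Int Int × List Int) i =>
        let x := PySem.List.pyGetD ar i 0
        (s.1.insert x i, s.2 ++ [min (s.1.getD x n) (PySem.List.pyGetD s.2 (-1) 0)]))
      (PySem.Dict.empty, [n])) = loopR ar n n.toNat := by
  rw [PySem.List.pyRange_neg_one]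
  have h1 : ((n - 1) - (-1)).toNat = n.toNat := by omega
  rw [h1]
  induction n.toNat with
  | zero => rfl
  | succ j ih =>
    rw [List.range_succ, List.map_append, List.foldl_append, ih]
    simp [loopR]

-- joint invariant of the backward pass: the dict is the next-occurrence table of the
-- processed suffix and the reach list is F on the processed positions.
lemma loopR_spec (ar : List Int) (n : Int) (N : Nat) (hn : n = (N : Int)) :
    ∀ j, j ≤ N →
      ((loopR ar n j).2 = ((List.range' (N - j) (j + 1)).map (fun u => ((F ar N u : Nat) : Int))).reverse) ∧
      (∀ v, (loopR ar n j).1.getD v n =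
        (if scanN ar v N (N - j) < N then ((scanN ar v N (N - j) : Nat) : Int) else n)) := by
  intro j
  induction j with
  | zero =>
    intro _
    constructor
    · show [n] = ((List.range' N 1).map _).reverse
      rw [List.range'_one]
      simp [F_of_ge ar N N (by omega), hn]
    · intro v
      have hs : scanN ar v N N = N := by rw [scanN]; simp
      simp only [Nat.sub_zero]
      rw [hs]
      simp [loopR, PySem.Dict.getD_empty]
  | succ j ih =>
    intro hj
    obtain ⟨hreach, hdict⟩ := ih (by omega)
    set t := N - j with ht
    have htpos : 1 ≤ t := by omega
    have htN : t ≤ N := by omega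
    have hidx : (n - 1) - (j : Int) = ((t - 1 : Nat) : Int) := by
      rw [hn]; omega
    have hx : PySem.List.pyGetD ar ((n - 1) - (j : Int)) 0 = ar.getD (t - 1) 0 := by
      rw [hidx, PySem.List.pyGetD_natCast]
    have hNj1 : N - (j + 1) = t - 1 := by omega
    constructor
    · -- reach list
      show (loopR ar n j).2 ++
            [min ((loopR ar n j).1.getD (PySem.List.pyGetD ar ((n-1) - (j:Int)) 0) n)
              (PySem.List.pyGetD (loopR ar n j).2 (-1) 0)]
          = ((List.range' (N - (j+1)) (j + 2)).map (fun u => ((F ar N u : Nat) : Int))).reverse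
      have hhead : PySem.List.pyGetD (loopR ar n j).2 (-1) 0 = ((F ar N t : Nat) : Int) := by
        rw [hreach, List.range'_succ]
        rw [List.map_cons, List.reverse_cons]
        exact PySem.List.pyGetD_neg_one_append_singleton _ _ _
      have hnx := scanN_spec ar (ar.getD (t - 1) 0) N (N - t) t (by omega) htN
      have hdv : (loopR ar n j).1.getD (PySem.List.pyGetD ar ((n-1) - (j:Int)) 0) n
          = ((scanN ar (ar.getD (t - 1) 0) N t : Nat) : Int) := by
        rw [hx, hdict (ar.getD (t - 1) 0), ht]
        by_cases hlt : scanN ar (ar.getD (t - 1) 0) N (N - j) < N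
        · rw [if_pos hlt]
        · rw [if_neg hlt]
          have : scanN ar (ar.getD (t - 1) 0) N (N - j) = N := by
            have := (scanN_spec ar (ar.getD (t - 1) 0) N (N - (N - j)) (N - j) (by omega) (by omega)).2.1
            omega
          rw [this, hn]
      have hFt1 : F ar N (t - 1) = min (scanN ar (ar.getD (t - 1) 0) N t) (F ar N t) := by
        rw [F, if_pos (show t - 1 < N by omega)]
        have : t - 1 + 1 = t := by omega
        rw [this]
      rw [hdv, hhead, hNj1]
      have hrange : List.range' (t - 1) (j + 2) = (t - 1) :: List.range' t (j + 1) := by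
        have h11 : t - 1 + 1 = t := by omega
        rw [List.range'_succ, h11]
      rw [hrange, List.map_cons, List.reverse_cons, ← hreach]
      congr 2
      rw [hFt1]
      push_cast [Nat.cast_min]
      rfl
    · -- dict
      intro v
      show ((loopR ar n j).1.insert (PySem.List.pyGetD ar ((n-1) - (j:Int)) 0) ((n-1) - (j:Int))).getD v n = _
      rw [PySem.Dict.getD_insert, hx, hNj1]
      by_cases hv : v = ar.getD (t - 1) 0
      · rw [if_pos hv, hidx]
        have hs : scanN ar v N (t - 1) = t - 1 := by
          rw [scanN, if_pos (show t - 1 < N by omega), if_pos (hv.symm)]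
        rw [hs, if_pos (show t - 1 < N by omega)]
      · rw [if_neg hv, hdict v, ht]
        have hs : scanN ar v N (t - 1) = scanN ar v N t := by
          rw [scanN, if_pos (show t - 1 < N by omega), if_neg (fun h => hv h.symm)]
          congr 1
          omega
        rw [hs]

-- lookup in the finished reach list
lemma reach_lookup (ar : List Int) (N : Nat) (p : Nat) (hp : p ≤ N) :
    PySem.List.pyGetD ((List.range' 0 (N + 1)).map (fun u => ((F ar N u : Nat) : Int))) ((p : Nat) : Int) 0
      = ((F ar N p : Nat) : Int) := by
  rw [PySem.List.pyGetD_natCast]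
  have hlen : ((List.range' 0 (N + 1)).map (fun u => ((F ar N u : Nat) : Int))).length = N + 1 := by
    simp
  have hplen : p < ((List.range' 0 (N + 1)).map (fun u => ((F ar N u : Nat) : Int))).length := by omega
  rw [List.getD_eq_getElem _ _ hplen]
  simp

lemma posFrom_shift (ar : List Int) (N i : Nat) :
    ∀ j, posFrom ar N i (j + 1) = posFrom ar N (F ar N i) j := by
  intro j
  induction j with
  | zero => rfl
  | succ j ih =>
    show F ar N (posFrom ar N i (j + 1)) = F ar N (posFrom ar N (F ar N i) j)
    rw [ih]

-- the jump loop follows the chain of F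
lemma jumpB (ar : List Int) (n : Int) (N : Nat) (hn : n = (N : Int)) (reach : List Int)
    (hr : ∀ p : Nat, p ≤ N → PySem.List.pyGetD reach ((p : Nat) : Int) 0 = ((F ar N p : Nat) : Int)) :
    ∀ (k i : Nat) (fuel : Nat) (cnt : Int), i ≤ N → k < fuel →
      (∀ j, j < k → F ar N (posFrom ar N i j) < N) →
      N ≤ F ar N (posFrom ar N i k) →
      jumpLoopB reach n fuel ((i : Nat) : Int) cnt = cnt + k := by
  intro k
  induction k with
  | zero =>
    intro i fuel cnt hi hfuel _ hend
    obtain ⟨f, rfl⟩ : ∃ f, fuel = f + 1 := ⟨fuel - 1, by omega⟩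
    rw [jumpLoopB, hr i hi]
    have : ¬ (((F ar N i : Nat) : Int) < n) := by
      rw [hn]
      exact_mod_cast not_lt.mpr hend
    rw [if_neg this]
    omega
  | succ k ih =>
    intro i fuel cnt hi hfuel hchain hend
    obtain ⟨f, rfl⟩ : ∃ f, fuel = f + 1 := ⟨fuel - 1, by omega⟩
    have hFi : F ar N i < N := hchain 0 (by omega)
    rw [jumpLoopB, hr i hi]
    have hlt : (((F ar N i : Nat) : Int) < n) := by
      rw [hn]
      exact_mod_cast hFi
    rw [if_pos hlt]
    have hrec := ih (F ar N i) f (cnt + 1) (by omega) (by omega)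
      (fun j hj => by rw [← posFrom_shift]; exact hchain (j + 1) (by omega))
      (by rw [← posFrom_shift]; exact hend)
    rw [hrec]
    push_cast
    ring

-- the chain length is bounded by its final position
lemma le_posFrom (ar : List Int) (N : Nat) :
    ∀ k, (∀ j, j < k → F ar N (posFrom ar N 0 j) < N) → k ≤ posFrom ar N 0 k := by
  intro k
  induction k with
  | zero => omega
  | succ k ih =>
    intro hchain
    have h1 : k ≤ posFrom ar N 0 k := ih (fun j hj => hchain j (by omega))
    have h2 : F ar N (posFrom ar N 0 k) < N := hchain k (by omega)
    have h3 : posFrom ar N 0 k < N := by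
      by_contra h
      rw [F_of_ge ar N _ h] at h2
      omega
    have h4 : posFrom ar N 0 k < F ar N (posFrom ar N 0 k) := lt_F ar N _ h3
    show k + 1 ≤ F ar N (posFrom ar N 0 k)
    omega

-- ===== VERDICT (by name: the statement is the Claim_ definition above) =====
theorem minimumSubarrays_spec : Claim_equal_minimumSubarrays := by
  intro ar n _ hpre
  unfold Spec_minimumSubarrays minimumSubarrays minimumSubarrays_alt
  by_cases hn0 : n ≤ 0
  · -- both return 1
    rw [PySem.List.pyRange_one_eq_nil hn0,
        PySem.List.pyRange_neg_one_eq_nil (by omega : n - 1 ≤ -1)]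
    show (1 : Int) = jumpLoopB ((PySem.List.slice? [n] none none (-1)).getD []) n (n.toNat + 1) 0 1
    rw [PySem.List.slice?_none_none_neg_one]
    have ht : n.toNat = 0 := by omega
    rw [ht]
    show (1 : Int) = jumpLoopB [n] n 1 0 1
    rw [jumpLoopB]
    rw [PySem.List.pyGetD_zero_cons]
    simp
  · rw [not_le] at hn0
    set N := n.toNat with hN
    have hnN : n = (N : Int) := by omega
    have hNlen : N ≤ ar.length := by
      unfold Pre_minimumSubarrays at hpre
      omega
    -- A side
    obtain ⟨k, hA, hle, hFle, hchain⟩ := invA ar N hNlen N (le_refl N)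
    have hAval : ((PySem.List.pyRange 0 n 1).foldl
        (fun (s : List Int × Int) i =>
          let x := PySem.List.pyGetD ar i 0
          if PySem.List.count s.1 x == 0 then (s.1 ++ [x], s.2)
          else ([x], s.2 + 1))
        ([], 1)).2 = (k : Int) + 1 := by
      rw [hnN, foldA_eq, hA]
    -- B side
    rw [hAval, foldB_eq]
    obtain ⟨hreach, _⟩ := loopR_spec ar n N hnN N (le_refl N)
    have hNN : N - N = 0 := by omega
    rw [hNN] at hreach
    have hrev : (PySem.List.slice? (loopR ar n N).2 none none (-1)).getD []
        = (List.range' 0 (N + 1)).map (fun u => ((F ar N u : Nat) : Int)) := by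
      rw [PySem.List.slice?_none_none_neg_one, hreach]
      simp
    have hr : ∀ p : Nat, p ≤ N →
        PySem.List.pyGetD ((PySem.List.slice? (loopR ar n N).2 none none (-1)).getD [])
          ((p : Nat) : Int) 0 = ((F ar N p : Nat) : Int) := by
      intro p hp
      rw [hrev]
      exact reach_lookup ar N p hp
    have hkN : k ≤ N := le_trans (le_posFrom ar N k hchain) hle
    have hjump := jumpB ar n N hnN ((PySem.List.slice? (loopR ar n N).2 none none (-1)).getD []) hr k 0 (n.toNat + 1) 1
      (by omega) (by omega) (fun j hj => hchain j hj) hFle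
    have h0 : ((0 : Nat) : Int) = (0 : Int) := rfl
    rw [h0] at hjump
    rw [hjump]
    ring
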